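-- pv_equiv track=rewrite | github.com/yk-ahead/preprocess_code_adjacency_matrix | utils_ahead.py | split_camelcase
-- ===== SOURCE A (Python) =====
-- def split_camelcase(camel_case_identifier):
-- # def split_camelcase(camel_case_identifier: str) -> List[str]:
--     """
--     Split camelCase identifiers.
--     come from code transformer
--     """
--     if not len(camel_case_identifier):
--         return []
--     # split into words based on adjacent cases being the same
--     result = []
--     current = str(camel_case_identifier[0])
--     prev_upper = camel_case_identifier[0].isupper()
--     prev_digit = camel_case_identifier[0].isdigit()
--     prev_special = not camel_case_identifier[0].isalnum()
--     for c in camel_case_identifier[1:]: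
--         upper = c.isupper()
--         digit = c.isdigit()
--         special = not c.isalnum()
--         new_upper_word = upper and not prev_upper
--         new_digit_word = digit and not prev_digit
--         new_special_word = special and not prev_special
--         if new_digit_word or new_upper_word or new_special_word:
--             result.append(current)
--             current = c
--         elif not upper and prev_upper and len(current) > 1:
--             result.append(current[:-1])
--             current = current[-1] + c
--         elif not digit and prev_digit:
--             result.append(current)
--             current = c
--         elif not special and prev_special:
--             result.append(current)
--             current = c
--         else:
--             current += c
--         prev_digit = digit
--         prev_upper = upper
--         prev_special = special
--     result.append(current)
--
--
--     return result
-- ===== SOURCE B (Python) =====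
-- # B: right-to-left single pass with a purely local boundary predicate (one char of
-- # lookahead replaces A's retroactive buffer edit); words are built back-to-front.
-- def _boundary(x, y, z):
--     # True iff a word boundary falls between adjacent chars x, y (z = char after y, or None).
--     if (y.isdigit() and not x.isdigit()) or (y.isupper() and not x.isupper()) \
--        or (not y.isalnum() and x.isalnum()):
--         return True  # a new digit/upper/special run starts at y
--     if (not y.isdigit() and x.isdigit()) or (y.isalnum() and not x.isalnum()):
--         return True  # a digit/special run ends before y
--     # acronym rule: ...XYz -> cut before Y (Y starts the new lowercase-tailed word)
--     return x.isupper() and y.isupper() and z is not None \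
--         and not z.isupper() and not z.isdigit() and z.isalnum()
--
-- def split_camelcase(camel_case_identifier):
--     s = camel_case_identifier
--     if not s:
--         return []
--     n = len(s)
--     rwords = []         # completed words, right-to-left
--     rbuf = [s[n - 1]]   # chars of the word under construction, right-to-left
--     for j in range(n - 2, -1, -1):
--         z = s[j + 2] if j + 2 < n else None
--         if _boundary(s[j], s[j + 1], z):
--             rwords.append(''.join(reversed(rbuf)))
--             rbuf = [s[j]]
--         else:
--             rbuf.append(s[j])
--     rwords.append(''.join(reversed(rbuf)))
--     rwords.reverse()
--     return rwords
-- ===== Notes on version B (the rewrite author's own statement) =====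
-- stated objective: alternative
-- what changed: A builds words left-to-right in a mutable buffer and retroactively splits the buffer (result.append(current[:-1])) when an acronym run ends; B makes a single right-to-left pass with a purely local boundary predicate that uses one character of lookahead instead of the retroactive edit, emitting words back-to-front.
import Mathlib
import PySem

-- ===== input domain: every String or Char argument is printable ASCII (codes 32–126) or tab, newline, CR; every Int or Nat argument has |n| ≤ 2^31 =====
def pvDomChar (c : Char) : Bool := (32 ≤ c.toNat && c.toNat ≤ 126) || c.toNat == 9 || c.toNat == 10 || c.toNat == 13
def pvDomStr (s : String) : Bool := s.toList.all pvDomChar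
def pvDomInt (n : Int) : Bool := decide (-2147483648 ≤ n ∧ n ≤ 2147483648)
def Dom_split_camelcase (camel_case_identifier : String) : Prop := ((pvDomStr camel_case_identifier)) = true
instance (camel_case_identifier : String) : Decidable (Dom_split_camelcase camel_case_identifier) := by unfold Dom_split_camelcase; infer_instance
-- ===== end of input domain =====

-- B replaces A's left-to-right loop with its retroactive buffer edit by a right-to-left
-- pass driven by a purely local boundary predicate with one char of lookahead
-- (objective: alternative; both are one-pass).

-- ===== PORT A =====
-- A's for-loop as tail recursion on the remaining chars; state = (current word,
-- prev_upper, prev_digit, prev_special, result), exactly the Python's.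
def splitLoopA (cs : List Char) (cur : List Char) (pu pd ps : Bool)
    (res : List (List Char)) : List (List Char) :=
  match cs with
  | [] => res ++ [cur]
  | c :: rest =>
    let u := PySem.Chars.isupper c
    let d := PySem.Chars.isdigit c
    let sp := !(PySem.Chars.isalnum c)
    if (d && !pd) || (u && !pu) || (sp && !ps) then
      splitLoopA rest [c] u d sp (res ++ [cur])
    else if !u && pu && decide (cur.length > 1) then
      splitLoopA rest (cur.getLast?.toList ++ [c]) u d sp (res ++ [cur.dropLast])
    else if !d && pd then
      splitLoopA rest [c] u d sp (res ++ [cur])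
    else if !sp && ps then
      splitLoopA rest [c] u d sp (res ++ [cur])
    else
      splitLoopA rest (cur ++ [c]) u d sp res

def split_camelcase (camel_case_identifier : String) : List String :=
  match camel_case_identifier.toList with
  | [] => []
  | c0 :: rest =>
    (splitLoopA rest [c0] (PySem.Chars.isupper c0) (PySem.Chars.isdigit c0)
      (!(PySem.Chars.isalnum c0)) []).map (fun w => String.ofList w)

-- ===== PORT B =====
-- Source B's right-to-left loop is ported as structural recursion on the char list:
-- the loop state after index j is exactly segsB s[j] (suffix after j) — i.e.
-- (reversed rbuf, reversed rwords); Source B's final reversed/reverse() calls are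
-- folded into this build order.  lowerAfter/boundaryB transcribe _boundary.
def lowerAfter (z : Option Char) : Bool :=
  match z with
  | some c => !PySem.Chars.isupper c && !PySem.Chars.isdigit c && PySem.Chars.isalnum c
  | none => false

def boundaryB (x y : Char) (z : Option Char) : Bool :=
  ((PySem.Chars.isdigit y && !PySem.Chars.isdigit x)
      || (PySem.Chars.isupper y && !PySem.Chars.isupper x)
      || (!PySem.Chars.isalnum y && PySem.Chars.isalnum x))
  || ((!PySem.Chars.isdigit y && PySem.Chars.isdigit x)
      || (PySem.Chars.isalnum y && !PySem.Chars.isalnum x))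
  || (PySem.Chars.isupper x && PySem.Chars.isupper y && lowerAfter z)

def segsB (x : Char) (cs : List Char) : List Char × List (List Char) :=
  match cs with
  | [] => ([x], [])
  | y :: rs =>
    let (w, ws) := segsB y rs
    if boundaryB x y rs.head? then ([x], w :: ws) else (x :: w, ws)

def split_camelcase_alt (camel_case_identifier : String) : List String :=
  match camel_case_identifier.toList with
  | [] => []
  | c0 :: rest =>
    let (w, ws) := segsB c0 rest
    (w :: ws).map (fun w => String.ofList w)

-- ===== PRECONDITION & SPEC =====
def Spec_split_camelcase (camel_case_identifier : String) (out : List String) : Prop := out = split_camelcase_alt camel_case_identifier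
instance (camel_case_identifier : String) (out : List String) : Decidable (Spec_split_camelcase camel_case_identifier out) := by unfold Spec_split_camelcase; infer_instance

-- ===== CLAIM (what is proved, stated in full; the proofs are below) =====
def Claim_equal_split_camelcase : Prop := ∀ (camel_case_identifier : String), Dom_split_camelcase camel_case_identifier → Spec_split_camelcase camel_case_identifier (split_camelcase camel_case_identifier)

-- ===== LEMMAS AND PROOFS =====

theorem upper_not_digit (c : Char) (h : PySem.Chars.isupper c = true) :
    PySem.Chars.isdigit c = false := by
  simp [PySem.Chars.isupper, Char.le_def, UInt32.le_iff_toNat_le] at h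
  simp [PySem.Chars.isdigit, Char.le_def, UInt32.le_iff_toNat_le]; omega

theorem upper_alnum (c : Char) (h : PySem.Chars.isupper c = true) :
    PySem.Chars.isalnum c = true := by
  simp [PySem.Chars.isalnum, PySem.Chars.isalpha, h]

theorem digit_not_upper (c : Char) (h : PySem.Chars.isdigit c = true) :
    PySem.Chars.isupper c = false := by
  cases hu : PySem.Chars.isupper c
  · rfl
  · exact absurd h (by simp [upper_not_digit c hu])

def acroPending (p : List Char) (x : Char) (cs : List Char) : Bool :=
  match cs with
  | [] => false
  | c :: _ =>
    !p.isEmpty && PySem.Chars.isupper x && !PySem.Chars.isupper c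
      && !PySem.Chars.isdigit c && PySem.Chars.isalnum c

-- pure-Boolean facts about A's branch conditions vs B's boundary, proved by decide;
-- atoms: d?/u?/a? = isdigit/isupper/isalnum of c and x, m = lowerAfter lookahead, pe = p.isEmpty
theorem bb1a : ∀ dc uc ac dx ux ax pe : Bool,
    (dc && !dx || (uc && !ux) || (!ac && !!ax)) = true →
    (!pe && ux && !uc && !dc && ac) = false := by decide

theorem bb1b : ∀ dc uc ac dx ux ax m : Bool,
    (dc && !dx || (uc && !ux) || (!ac && ax)) = true →
    ((dc && !dx || (uc && !ux) || (!ac && ax)) || (!dc && dx || (ac && !ax))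
      || (ux && uc && m)) = true := by decide

theorem bb2 : ∀ dc uc ac dx ux ax m : Bool,
    (dc && !dx || (uc && !ux) || (!ac && ax)) = false →
    uc = false → ux = true → dx = false → ax = true →
    ((dc && !dx || (uc && !ux) || (!ac && ax)) || (!dc && dx || (ac && !ax))
      || (ux && uc && m)) = false := by decide

theorem bb2n : ∀ dc uc ac dx ux ax pe : Bool,
    (dc && !dx || (uc && !ux) || (!ac && ax)) = false →
    uc = false → ux = true → dx = false → ax = true → pe = false →
    (!pe && ux && !uc && !dc && ac) = true := by decide

theorem bb3a : ∀ dc uc ac dx ux pe : Bool,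
    (!dc && dx) = true → ux = false →
    (!pe && ux && !uc && !dc && ac) = false := by decide

theorem bb3b : ∀ dc uc ac dx ux ax m : Bool,
    (!dc && dx) = true →
    ((dc && !dx || (uc && !ux) || (!ac && ax)) || (!dc && dx || (ac && !ax))
      || (ux && uc && m)) = true := by decide

theorem bb4b : ∀ dc uc ac dx ux ax m : Bool,
    (!!ac && !ax) = true →
    ((dc && !dx || (uc && !ux) || (!ac && ax)) || (!dc && dx || (ac && !ax))
      || (ux && uc && m)) = true := by decide

theorem bb5 : ∀ dc uc ac dx ux ax uz dz az : Bool,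
    (dc && !dx || (uc && !ux) || (!ac && ax)) = false →
    (!dc && dx) = false → (!!ac && !ax) = false →
    (uc && !uz && !dz && az) = false →
    ((dc && !dx || (uc && !ux) || (!ac && ax)) || (!dc && dx || (ac && !ax))
      || (ux && uc && (!uz && !dz && az))) = false := by decide

-- normalize A's !! on the special flag so h1 matches the bb-lemmas
theorem bangbang (b : Bool) : (!!b) = b := by cases b <;> rfl

set_option maxHeartbeats 1000000 in
theorem splitLoopA_eq (cs : List Char) : ∀ (p : List Char) (x : Char) (res : List (List Char)),
    splitLoopA cs (p ++ [x]) (PySem.Chars.isupper x) (PySem.Chars.isdigit x)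
      (!(PySem.Chars.isalnum x)) res =
    res ++ (if acroPending p x cs
            then p :: (segsB x cs).1 :: (segsB x cs).2
            else (p ++ (segsB x cs).1) :: (segsB x cs).2) := by
  induction cs with
  | nil => intro p x res; simp [splitLoopA, segsB, acroPending]
  | cons c rest ih =>
    intro p x res
    simp only [splitLoopA]
    rw [show (p ++ [x]).dropLast = p from by simp,
        show (p ++ [x]).getLast? = some x from by simp]
    split_ifs with h1 ha1 h2 ha2 h3 ha3 h4 ha4 ha5
    all_goals simp only [Bool.not_not] at h1 ⊢
    -- 1a: new-word branch but RHS pending: impossible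
    · exact absurd (show acroPending p x (c :: rest) = true from ha1)
        (by simp [acroPending,
          bb1a (PySem.Chars.isdigit c) (PySem.Chars.isupper c) (PySem.Chars.isalnum c)
            (PySem.Chars.isdigit x) (PySem.Chars.isupper x) (PySem.Chars.isalnum x)
            (p.isEmpty) (by simpa [bangbang] using h1)])
    -- 1b: new-word branch: B cuts here too
    · rw [show [c] = ([] : List Char) ++ [c] from rfl, ih [] c]
      have hbnd : boundaryB x c rest.head? = true :=
        bb1b _ _ _ _ _ _ _ (by simpa [bangbang] using h1)
      simp [segsB, hbnd, acroPending]
      cases rest <;> rfl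
    -- 2: acronym branch: B's pending cut between p.getLast and x
    · simp only [Bool.and_eq_true, Bool.not_eq_true', decide_eq_true_eq] at h2
      rcases h2 with ⟨⟨huc, hux⟩, hlen⟩
      rw [show (some x).toList ++ [c] = [x] ++ [c] from rfl, ih [x] c]
      have hbnd : boundaryB x c rest.head? = false :=
        bb2 _ _ _ _ _ _ _ (by simpa [bangbang] using Bool.eq_false_iff.mpr h1)
          huc hux (upper_not_digit x hux) (upper_alnum x hux)
      simp [segsB, hbnd, acroPending, huc]
      cases rest <;> rfl
    -- 2-neg: RHS pending must hold: contradiction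
    · exfalso
      simp only [Bool.and_eq_true, Bool.not_eq_true', decide_eq_true_eq] at h2
      rcases h2 with ⟨⟨huc, hux⟩, hlen⟩
      have hp : p.isEmpty = false := by
        cases p
        · simp at hlen
        · rfl
      exact ha2 (show acroPending p x (c :: rest) = true from
        bb2n _ _ _ _ _ _ _ (by simpa [bangbang] using Bool.eq_false_iff.mpr h1)
          huc hux (upper_not_digit x hux) (upper_alnum x hux) hp)
    -- 3a: digit-exit with RHS pending: impossible (x is a digit, not upper)
    · exact absurd (show acroPending p x (c :: rest) = true from ha3)
        (by
          simp only [Bool.and_eq_true, Bool.not_eq_true'] at h3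
          simp [acroPending,
            bb3a (PySem.Chars.isdigit c) (PySem.Chars.isupper c) (PySem.Chars.isalnum c)
              (PySem.Chars.isdigit x) (PySem.Chars.isupper x)
              (p.isEmpty) (by simp [h3.1, h3.2]) (digit_not_upper x h3.2)])
    -- 3b: digit-exit branch: B cuts here too
    · rw [show [c] = ([] : List Char) ++ [c] from rfl, ih [] c]
      have hbnd : boundaryB x c rest.head? = true := bb3b _ _ _ _ _ _ _ h3
      simp [segsB, hbnd, acroPending]
      cases rest <;> rfl
    -- 4a: special-exit with RHS pending: impossible (x not alnum, pending needs upper x)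
    · exact absurd (show acroPending p x (c :: rest) = true from ha4)
        (by
          simp only [Bool.and_eq_true, Bool.not_eq_true', Bool.not_not] at h4
          have hux : PySem.Chars.isupper x = false := by
            cases hu : PySem.Chars.isupper x
            · rfl
            · exact absurd (upper_alnum x hu) (by simp [h4.2])
          simp [acroPending, hux])
    -- 4b: special-exit branch: B cuts here too
    · rw [show [c] = ([] : List Char) ++ [c] from rfl, ih [] c]
      have hbnd : boundaryB x c rest.head? = true := bb4b _ _ _ _ _ _ _ h4
      simp [segsB, hbnd, acroPending]
      cases rest <;> rfl
    -- 5a: glue branch with RHS pending: impossible (the acronym branch would have fired)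
    · exfalso
      simp only [acroPending, Bool.and_eq_true, Bool.not_eq_true'] at ha5
      rcases ha5 with ⟨⟨⟨⟨hp, hux⟩, huc⟩, hd⟩, ha⟩
      apply h2
      simp only [Bool.and_eq_true, Bool.not_eq_true', decide_eq_true_eq]
      refine ⟨⟨huc, hux⟩, ?_⟩
      cases p
      · simp at hp
      · simp
    -- 5b: glue branch: B glues here too (or defers the same pending acronym cut)
    · rw [ih (p ++ [x]) c]
      by_cases hab : acroPending (p ++ [x]) c rest = true
      · cases rest with
        | nil => simp [acroPending] at hab
        | cons z rs =>
          simp only [acroPending, Bool.and_eq_true, Bool.not_eq_true'] at hab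
          rcases hab with ⟨⟨⟨⟨hpx, huc⟩, huz⟩, hdz⟩, haz⟩
          have hux : PySem.Chars.isupper x = true := by
            cases hx : PySem.Chars.isupper x
            · exact absurd (Bool.eq_false_iff.mpr h1)
                (by simp [huc, hx, upper_not_digit c huc, upper_alnum c huc])
            · rfl
          have hbnd : boundaryB x c (some z) = true := by
            simp [boundaryB, lowerAfter, hux, huc, huz, hdz, haz]
          simp [segsB, hbnd, acroPending, huc, huz, hdz, haz]
      · cases rest with
        | nil =>
          have hbnd : boundaryB x c none = false :=
            bb5 _ _ _ _ _ _ true false false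
              (by simpa [bangbang] using Bool.eq_false_iff.mpr h1)
              (Bool.eq_false_iff.mpr h3) (by simpa [Bool.not_not] using Bool.eq_false_iff.mpr h4)
              (by simp)
          simp [segsB, hbnd, acroPending]
        | cons z rs =>
          have hpe : (p ++ [x]).isEmpty = false := by simp
          have hab2 : (PySem.Chars.isupper c && !PySem.Chars.isupper z
              && !PySem.Chars.isdigit z && PySem.Chars.isalnum z) = false := by
            simpa [acroPending, hpe] using Bool.eq_false_iff.mpr hab
          have hbnd : boundaryB x c (some z) = false :=
            bb5 _ _ _ _ _ _ _ _ _
              (by simpa [bangbang] using Bool.eq_false_iff.mpr h1)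
              (Bool.eq_false_iff.mpr h3) (by simpa [Bool.not_not] using Bool.eq_false_iff.mpr h4)
              hab2
          rw [if_neg hab]
          simp [segsB, hbnd]

theorem acroPending_nil (x : Char) (cs : List Char) : acroPending [] x cs = false := by
  cases cs <;> rfl

-- ===== VERDICT (by name: the statement is the Claim_ definition above) =====
theorem split_camelcase_spec : Claim_equal_split_camelcase := by
  intro s _
  unfold Spec_split_camelcase split_camelcase split_camelcase_alt
  cases hs : s.toList with
  | nil => rfl
  | cons c0 rest =>
    simp only []
    show (splitLoopA rest [c0] _ _ _ []).map _ = _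
    rw [show ([c0] : List Char) = [] ++ [c0] from rfl,
        splitLoopA_eq rest [] c0 [], acroPending_nil]
    simp
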